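-- pv_equiv track=rewrite | github.com/zsbati/PycharmProjects | ClimbingTheLeaderboardChallenge/main.py | climbingLeaderboard
-- ===== SOURCE A (Python) =====
-- def climbingLeaderboard(ranked, player):
--     # Write your code here
--
--     out = []  # output positions here
--     rank_set = set(ranked)
--     ranks = list(rank_set)
--     ranks.sort(reverse=True)
--
--     for i in range(len(player)):
--         score = player[i]
--
--         if score >= ranks[0]:
--             out.append(1)
--             if score > ranks[0]:
--                 ranks.insert(0, score)
--
--         elif score <= ranks[len(ranks) - 1]:
--             if score == ranks[len(ranks)-1]:
--                 out.append(len(ranks))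
--             if score != ranks[len(ranks)-1]:
--                 out.append(len(ranks)+1)
--                 ranks.append(score)
--
--         else:
--             for j in range(len(ranks)-1):
--                 if score == ranks[j]:
--                     out.append(j+1)
--                     break
--                 if (score-ranks[j])*(score-ranks[j+1]) < 0:
--                     out.append(j+2)
--                     break
--
--     return out
--
-- ranked = [100, 90, 90, 80]
--
-- player = [70, 80, 105]
-- ===== SOURCE B (Python) =====
-- def climbingLeaderboard(ranked, player):
--     # Keep the distinct scores ascending; answer each query with a binary
--     # search (rank = #strictly-greater + 1) instead of a linear scan, and
--     # extend the board only when a score goes past either end.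
--     asc = sorted(set(ranked))
--     out = []
--     for score in player:
--         lo, hi = 0, len(asc)
--         while lo < hi:
--             mid = (lo + hi) // 2
--             if asc[mid] <= score:
--                 lo = mid + 1
--             else:
--                 hi = mid
--         out.append(len(asc) - lo + 1)
--         if score > asc[-1]:
--             asc.append(score)
--         elif score < asc[0]:
--             asc.insert(0, score)
--     return out
-- ===== Notes on version B (the rewrite author's own statement) =====
-- stated objective: faster
-- what changed: B replaces A's three-way branch chain with a linear middle scan by one uniform rule — rank = (count of current board scores strictly greater) + 1, computed by a hand-written binary search on the ascending dedup-sorted board — extending the board only past either end, exactly as A does.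
import Mathlib
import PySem

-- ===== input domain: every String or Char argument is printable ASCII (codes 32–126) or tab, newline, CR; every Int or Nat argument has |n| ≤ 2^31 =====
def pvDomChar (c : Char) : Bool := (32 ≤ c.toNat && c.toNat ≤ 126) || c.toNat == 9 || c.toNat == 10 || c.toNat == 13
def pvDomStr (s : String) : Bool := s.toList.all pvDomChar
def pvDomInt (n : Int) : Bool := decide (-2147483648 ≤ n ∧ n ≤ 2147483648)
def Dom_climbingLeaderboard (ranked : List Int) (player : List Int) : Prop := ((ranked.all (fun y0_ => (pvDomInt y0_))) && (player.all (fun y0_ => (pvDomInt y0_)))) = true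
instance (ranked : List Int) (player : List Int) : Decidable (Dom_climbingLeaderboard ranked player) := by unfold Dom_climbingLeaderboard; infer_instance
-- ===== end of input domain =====

-- B answers each query by binary search with the uniform rule rank = (#board scores > score) + 1
-- instead of A's branch chain with a linear middle scan; same end-only board extensions.

-- ===== PORT A =====
-- A's inner 'for j in range(len(ranks)-1): … break' loop
def pvAscan (score : Int) (ranks : List Int) (j : Nat) : Option Nat :=
  if _ : j < ranks.length - 1 then
    if score = ranks.getD j 0 then some (j + 1)
    else if (score - ranks.getD j 0) * (score - ranks.getD (j + 1) 0) < 0 then some (j + 2)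
    else pvAscan score ranks (j + 1)
  else none
termination_by ranks.length - 1 - j

-- A's main 'for i in range(len(player))' loop; ranks/out are the mutated state
def pvAloop (ranks : List Int) (out : List Int) (player : List Int) : List Int :=
  match player with
  | [] => out
  | score :: rest =>
    if score ≥ ranks.getD 0 0 then
      pvAloop (if score > ranks.getD 0 0 then score :: ranks else ranks) (out ++ [1]) rest
    else if score ≤ ranks.getD (ranks.length - 1) 0 then
      if score = ranks.getD (ranks.length - 1) 0 then
        pvAloop ranks (out ++ [(ranks.length : Int)]) rest
      else
        pvAloop (ranks ++ [score]) (out ++ [(ranks.length : Int) + 1]) rest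
    else
      match pvAscan score ranks 0 with
      | some r => pvAloop ranks (out ++ [(r : Int)]) rest
      | none => pvAloop ranks out rest

def climbingLeaderboard (ranked : List Int) (player : List Int) : List Int :=
  pvAloop (PySem.List.sorted (PySem.Set.ofList ranked) (fun x => x) true) [] player

-- ===== PORT B =====
-- B's hand-written bisect_right: 'while lo < hi: …'
def pvBsearch (asc : List Int) (score : Int) (lo hi : Nat) : Nat :=
  if _ : lo < hi then
    let mid := (lo + hi) / 2
    if asc.getD mid 0 ≤ score then pvBsearch asc score (mid + 1) hi
    else pvBsearch asc score lo mid
  else lo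
termination_by hi - lo
decreasing_by all_goals omega

-- B's 'for score in player' loop; asc/out are the mutated state
def pvBloop (asc : List Int) (out : List Int) (player : List Int) : List Int :=
  match player with
  | [] => out
  | score :: rest =>
    let lo := pvBsearch asc score 0 asc.length
    let out' := out ++ [(asc.length : Int) - (lo : Int) + 1]
    let asc' :=
      if score > asc.getD (asc.length - 1) 0 then asc ++ [score]
      else if score < asc.getD 0 0 then score :: asc
      else asc
    pvBloop asc' out' rest

def climbingLeaderboard_alt (ranked : List Int) (player : List Int) : List Int :=
  pvBloop (PySem.List.sorted (PySem.Set.ofList ranked) (fun x => x) false) [] player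

-- ===== PRECONDITION & SPEC =====
-- Pre_ excludes only inputs where A raises: an empty leaderboard with a nonempty
-- player list makes A's 'ranks[0]' raise IndexError (B raises there too).
def Pre_climbingLeaderboard (ranked : List Int) (player : List Int) : Prop :=
  ranked ≠ [] ∨ player = []
instance (ranked : List Int) (player : List Int) : Decidable (Pre_climbingLeaderboard ranked player) := by
  unfold Pre_climbingLeaderboard; infer_instance
def pvWitness_climbingLeaderboard : List Int × List Int := ([100, 90, 90, 80], [70, 80, 105])

def Spec_climbingLeaderboard (ranked : List Int) (player : List Int) (out : List Int) : Prop := out = climbingLeaderboard_alt ranked player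
instance (ranked : List Int) (player : List Int) (out : List Int) : Decidable (Spec_climbingLeaderboard ranked player out) := by unfold Spec_climbingLeaderboard; infer_instance

-- ===== CLAIM (what is proved, stated in full; the proofs are below) =====
def Claim_equal_climbingLeaderboard : Prop := ∀ (ranked : List Int) (player : List Int), Dom_climbingLeaderboard ranked player → Pre_climbingLeaderboard ranked player → Spec_climbingLeaderboard ranked player (climbingLeaderboard ranked player)

-- ===== LEMMAS AND PROOFS =====

def cntGT (ranks : List Int) (score : Int) : Nat := ranks.countP (fun x => decide (score < x))

lemma char_desc (score : Int) :
    ∀ (ranks : List Int), ranks.Pairwise (· > ·) →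
      ∀ i < ranks.length, (score < ranks.getD i 0 ↔ i < cntGT ranks score) := by
  intro ranks
  induction ranks with
  | nil => intro _ i hi; simp at hi
  | cons a t ih =>
    intro hp i hi
    rw [List.pairwise_cons] at hp
    obtain ⟨ha, hpt⟩ := hp
    by_cases hsa : score < a
    · cases i with
      | zero =>
        simp [cntGT, hsa]
      | succ j =>
        simp only [List.getD_cons_succ]
        rw [ih hpt j (by simpa using hi)]
        simp [cntGT, hsa]
    · have hz : cntGT (a :: t) score = 0 := by
        simp only [cntGT, List.countP_eq_zero]
        intro x hx
        simp only [decide_eq_true_eq, not_lt]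
        rcases List.mem_cons.mp hx with rfl | hx
        · omega
        · have := ha x hx; omega
      rw [hz]
      cases i with
      | zero => simp [hsa]
      | succ j =>
        simp only [List.getD_cons_succ]
        have hj : j < t.length := by simpa using hi
        have : t.getD j 0 ∈ t := by
          rw [List.getD_eq_getElem _ _ hj]; exact List.getElem_mem hj
        have := ha _ this
        constructor
        · intro h; omega
        · omega

lemma cnt_reverse (ranks : List Int) (score : Int) :
    (ranks.reverse.countP (fun x => decide (x ≤ score)) : Int)
      = (ranks.length : Int) - (cntGT ranks score : Int) := by
  rw [List.countP_reverse]
  unfold cntGT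
  induction ranks with
  | nil => simp
  | cons a t ih =>
    simp only [List.countP_cons, List.length_cons]
    by_cases h : a ≤ score
    · have h2 : ¬ score < a := by omega
      simp [h, h2]; omega
    · have h2 : score < a := by omega
      simp [h, h2]; omega

lemma char_asc (score : Int) :
    ∀ (asc : List Int), asc.Pairwise (· < ·) →
      ∀ i < asc.length, (asc.getD i 0 ≤ score ↔ i < asc.countP (fun x => decide (x ≤ score))) := by
  intro asc
  induction asc with
  | nil => intro _ i hi; simp at hi
  | cons a t ih =>
    intro hp i hi
    rw [List.pairwise_cons] at hp
    obtain ⟨ha, hpt⟩ := hp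
    by_cases hsa : a ≤ score
    · cases i with
      | zero => simp [hsa]
      | succ j =>
        simp only [List.getD_cons_succ]
        rw [ih hpt j (by simpa using hi)]
        simp [hsa]
    · have hz : (a :: t).countP (fun x => decide (x ≤ score)) = 0 := by
        simp only [List.countP_eq_zero]
        intro x hx
        simp only [decide_eq_true_eq, not_le]
        rcases List.mem_cons.mp hx with rfl | hx
        · omega
        · have := ha x hx; omega
      rw [hz]
      cases i with
      | zero => simp [hsa]
      | succ j =>
        simp only [List.getD_cons_succ]
        have hj : j < t.length := by simpa using hi
        have hm : t.getD j 0 ∈ t := by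
          rw [List.getD_eq_getElem _ _ hj]; exact List.getElem_mem hj
        have := ha _ hm
        constructor
        · intro h; omega
        · omega

lemma bsearch_aux (asc : List Int) (score : Int) (k : Nat)
    (hchar : ∀ i < asc.length, (asc.getD i 0 ≤ score ↔ i < k)) :
    ∀ (n lo hi : Nat), hi - lo ≤ n → lo ≤ k → k ≤ hi → hi ≤ asc.length →
      pvBsearch asc score lo hi = k := by
  intro n
  induction n with
  | zero =>
    intro lo hi h1 h2 h3 h4
    rw [pvBsearch]
    have : ¬ lo < hi := by omega
    simp [this]; omega
  | succ m ih =>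
    intro lo hi h1 h2 h3 h4
    rw [pvBsearch]
    by_cases hlh : lo < hi
    · simp only [hlh, dif_pos]
      by_cases hmid : asc.getD ((lo + hi) / 2) 0 ≤ score
      · have hk : (lo + hi) / 2 < k := (hchar _ (by omega)).mp hmid
        simp only [hmid, if_pos]
        exact ih ((lo + hi) / 2 + 1) hi (by omega) (by omega) h3 h4
      · have hk : k ≤ (lo + hi) / 2 := by
          by_contra hc
          exact hmid ((hchar _ (by omega)).mpr (by omega))
        simp only [hmid, if_neg, not_false_iff]
        exact ih lo ((lo + hi) / 2) (by omega) h2 hk (by omega)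
    · simp [hlh]; omega

lemma bsearch_spec (asc : List Int) (score : Int) (h : asc.Pairwise (· < ·)) :
    pvBsearch asc score 0 asc.length = asc.countP (fun x => decide (x ≤ score)) := by
  exact bsearch_aux asc score _ (char_asc score asc h) asc.length 0 asc.length
    (by omega) (by omega) List.countP_le_length (le_refl _)

lemma ascan_eqcase (score : Int) (ranks : List Int)
    (hlt : cntGT ranks score < ranks.length - 1)
    (heq : ranks.getD (cntGT ranks score) 0 = score) :
    pvAscan score ranks (cntGT ranks score) = some (cntGT ranks score + 1) := by
  rw [pvAscan, dif_pos hlt, if_pos heq.symm]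

lemma ascan_aux (score : Int) (ranks : List Int)
    (hchar : ∀ i < ranks.length, (score < ranks.getD i 0 ↔ i < cntGT ranks score))
    (hcnt : cntGT ranks score < ranks.length)
    (hlast : ranks.getD (ranks.length - 1) 0 < score) :
    ∀ (n j : Nat), cntGT ranks score - j ≤ n →
      (j < cntGT ranks score ∨ (j = cntGT ranks score ∧ ranks.getD (cntGT ranks score) 0 = score)) →
      pvAscan score ranks j = some (cntGT ranks score + 1) := by
  have hlt : ranks.getD (cntGT ranks score) 0 = score → cntGT ranks score < ranks.length - 1 := by
    intro heq
    by_contra hcge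
    have hceq : cntGT ranks score = ranks.length - 1 := by omega
    rw [hceq] at heq
    omega
  intro n
  induction n with
  | zero =>
    intro j h1 h2
    have hj : j = cntGT ranks score ∧ ranks.getD (cntGT ranks score) 0 = score := by
      rcases h2 with h | h
      · omega
      · exact h
    rw [hj.1]
    exact ascan_eqcase score ranks (hlt hj.2) hj.2
  | succ m ih =>
    intro j h1 h2
    rcases h2 with hj | hj
    · -- j < cnt
      have hguard : j < ranks.length - 1 := by omega
      have hjlt : score < ranks.getD j 0 := (hchar j (by omega)).mpr hj
      rw [pvAscan]
      rw [dif_pos hguard]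
      rw [if_neg (by omega)]
      by_cases hj1 : j + 1 < cntGT ranks score
      · have hjlt1 : score < ranks.getD (j + 1) 0 := (hchar (j + 1) (by omega)).mpr hj1
        rw [if_neg (by nlinarith)]
        exact ih (j + 1) (by omega) (Or.inl hj1)
      · have hj1e : j + 1 = cntGT ranks score := by omega
        have hle : ranks.getD (j + 1) 0 ≤ score := by
          by_contra hc
          have := (hchar (j + 1) (by omega)).mp (by omega)
          omega
        by_cases heq : ranks.getD (j + 1) 0 = score
        · rw [if_neg (by rw [heq]; simp)]
          refine ih (j + 1) (by omega) (Or.inr ⟨hj1e, ?_⟩)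
          rw [← hj1e]; exact heq
        · have hstrict : ranks.getD (j + 1) 0 < score := by omega
          rw [if_pos (by nlinarith)]
          congr 1
          omega
    · rw [hj.1]
      exact ascan_eqcase score ranks (hlt hj.2) hj.2

lemma ascan_spec0 (score : Int) (ranks : List Int)
    (hchar : ∀ i < ranks.length, (score < ranks.getD i 0 ↔ i < cntGT ranks score))
    (hlen : 0 < ranks.length)
    (htop : ranks.getD 0 0 ≤ score → False)
    (hlast : ranks.getD (ranks.length - 1) 0 < score) :
    pvAscan score ranks 0 = some (cntGT ranks score + 1) := by
  have htop' : ¬ ranks.getD 0 0 ≤ score := htop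
  have h0 : 0 < cntGT ranks score := (hchar 0 hlen).mp (by omega)
  have hcnt : cntGT ranks score < ranks.length := by
    by_contra hc
    have hlt2 : ranks.length - 1 < cntGT ranks score := by omega
    have := (hchar (ranks.length - 1) (by omega)).mpr hlt2
    omega
  exact ascan_aux score ranks hchar hcnt hlast (cntGT ranks score) 0 (by omega) (Or.inl h0)

-- reverse endpoint lemmas
lemma rev_getD_zero (l : List Int) (h : l ≠ []) : l.reverse.getD 0 0 = l.getD (l.length - 1) 0 := by
  have hl : 0 < l.length := List.length_pos_iff.mpr h
  rw [List.getD_eq_getElem?_getD, List.getD_eq_getElem?_getD,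
      List.getElem?_reverse (by simpa using hl)]
  simp

lemma rev_getD_last (l : List Int) (h : l ≠ []) : l.reverse.getD (l.length - 1) 0 = l.getD 0 0 := by
  have hl : 0 < l.length := List.length_pos_iff.mpr h
  rw [List.getD_eq_getElem?_getD, List.getD_eq_getElem?_getD,
      List.getElem?_reverse (by omega)]
  rw [Nat.sub_self]

lemma desc_head_max (l : List Int) (hp : l.Pairwise (· > ·)) :
    ∀ x ∈ l, x ≤ l.getD 0 0 := by
  cases l with
  | nil => simp
  | cons a t =>
    rw [List.pairwise_cons] at hp
    intro x hx
    rcases List.mem_cons.mp hx with rfl | hx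
    · simp
    · have := hp.1 x hx
      simp only [List.getD_cons_zero]
      omega

lemma desc_last_min (l : List Int) (hp : l.Pairwise (· > ·)) :
    ∀ x ∈ l, l.getD (l.length - 1) 0 ≤ x := by
  induction l with
  | nil => simp
  | cons a t ih =>
    rw [List.pairwise_cons] at hp
    intro x hx
    cases t with
    | nil =>
      rcases List.mem_cons.mp hx with rfl | hx
      · simp
      · simp at hx
    | cons b u =>
      have hlen : (a :: b :: u).length - 1 = (b :: u).length - 1 + 1 := by
        simp
      rw [hlen, List.getD_cons_succ]
      have hlast : (b :: u).getD ((b :: u).length - 1) 0 ∈ (b :: u) := by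
        rw [List.getD_eq_getElem _ _ (by simp)]
        exact List.getElem_mem _
      rcases List.mem_cons.mp hx with rfl | hx
      · have := hp.1 _ hlast; omega
      · exact ih hp.2 x hx

lemma cnt_top (ranks : List Int) (score : Int) (hmax : ∀ x ∈ ranks, x ≤ score) :
    cntGT ranks score = 0 := by
  simp only [cntGT, List.countP_eq_zero]
  intro x hx
  have := hmax x hx
  simp; omega

lemma cnt_bot_eq (ranks : List Int) (score : Int) (hp : ranks.Pairwise (· > ·))
    (hmem : score ∈ ranks) (hmin : ∀ x ∈ ranks, score ≤ x) :
    cntGT ranks score = ranks.length - 1 := by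
  have hnd : ranks.Nodup := hp.imp (fun h => ne_of_gt h)
  have hsplit := List.length_eq_countP_add_countP (fun x => decide (score < x)) (l := ranks)
  have h1 : ranks.countP (fun x => !decide (score < x)) = 1 := by
    have hc : ranks.countP (fun x => !decide (score < x)) = ranks.countP (fun x => x == score) := by
      apply List.countP_congr
      intro x hx
      by_cases hxs : x = score
      · subst hxs; simp
      · have := hmin x hx
        have hlt : score < x := lt_of_le_of_ne this (Ne.symm hxs)
        simp [hlt, hxs]
    rw [hc]
    have : ranks.countP (fun x => x == score) = ranks.count score := rfl
    rw [this, List.count_eq_one_of_mem hnd hmem]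
  have hle : 0 < ranks.length := List.length_pos_of_mem hmem
  simp only [Bool.decide_coe, decide_not] at hsplit
  unfold cntGT
  omega

lemma cnt_below (ranks : List Int) (score : Int) (hmin : ∀ x ∈ ranks, score < x) :
    cntGT ranks score = ranks.length := by
  simp only [cntGT, List.countP_eq_length]
  intro x hx
  simp [hmin x hx]

lemma main_loop (player : List Int) :
    ∀ (ranks out : List Int), ranks ≠ [] → ranks.Pairwise (· > ·) →
      pvAloop ranks out player = pvBloop ranks.reverse out player := by
  induction player with
  | nil => intro ranks out _ _; rfl
  | cons score rest ih =>
    intro ranks out hne hp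
    have hlen : 0 < ranks.length := List.length_pos_iff.mpr hne
    have hasc : ranks.reverse.Pairwise (· < ·) := by
      rw [List.pairwise_reverse]; exact hp
    have hrl : ranks.reverse.length = ranks.length := List.length_reverse
    have hbotrev : ranks.reverse.getD 0 0 = ranks.getD (ranks.length - 1) 0 :=
      rev_getD_zero ranks hne
    have htoprev : ranks.reverse.getD (ranks.reverse.length - 1) 0 = ranks.getD 0 0 := by
      rw [hrl]; exact rev_getD_last ranks hne
    have hmax := desc_head_max ranks hp
    have hmin := desc_last_min ranks hp
    have hcle : cntGT ranks score ≤ ranks.length := List.countP_le_length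
    have hlo : (pvBsearch ranks.reverse score 0 ranks.reverse.length : Int)
        = (ranks.length : Int) - (cntGT ranks score : Int) := by
      rw [bsearch_spec ranks.reverse score hasc]
      exact cnt_reverse ranks score
    have htopmem : ranks.getD 0 0 ∈ ranks := by
      rw [List.getD_eq_getElem _ _ hlen]; exact List.getElem_mem hlen
    have hbotmem : ranks.getD (ranks.length - 1) 0 ∈ ranks := by
      rw [List.getD_eq_getElem _ _ (by omega)]; exact List.getElem_mem (by omega)
    have hbt : ranks.getD (ranks.length - 1) 0 ≤ ranks.getD 0 0 := hmax _ hbotmem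
    have hval : (ranks.reverse.length : Int) - (pvBsearch ranks.reverse score 0 ranks.reverse.length : Int) + 1
        = (cntGT ranks score : Int) + 1 := by
      rw [hlo, hrl]; omega
    simp only [pvAloop, pvBloop, hval, htoprev, hbotrev]
    by_cases h1 : score ≥ ranks.getD 0 0
    · rw [if_pos h1]
      by_cases h1s : score > ranks.getD 0 0
      · rw [if_pos h1s, if_pos h1s]
        have hc0 : cntGT ranks score = 0 := cnt_top ranks score (fun x hx => le_trans (hmax x hx) h1)
        rw [hc0]
        have : ranks.reverse ++ [score] = (score :: ranks).reverse := by simp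
        rw [this]
        have := ih (score :: ranks) (out ++ [1]) (by simp) (by
          rw [List.pairwise_cons]
          exact ⟨fun x hx => lt_of_le_of_lt (hmax x hx) h1s, hp⟩)
        simpa using this
      · rw [if_neg h1s, if_neg h1s]
        have heqtop : score = ranks.getD 0 0 := by omega
        have hnb : ¬ score < ranks.getD (ranks.length - 1) 0 := by omega
        rw [if_neg hnb]
        have hc0 : cntGT ranks score = 0 := cnt_top ranks score (fun x hx => le_trans (hmax x hx) h1)
        rw [hc0]
        simpa using ih ranks (out ++ [1]) hne hp
    · rw [if_neg h1]
      have hsc_top : score < ranks.getD 0 0 := by omega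
      have hngt : ¬ score > ranks.getD 0 0 := by omega
      rw [if_neg hngt]
      by_cases h2 : score ≤ ranks.getD (ranks.length - 1) 0
      · rw [if_pos h2]
        by_cases h2e : score = ranks.getD (ranks.length - 1) 0
        · have hnb : ¬ score < ranks.getD (ranks.length - 1) 0 := by omega
          rw [if_pos h2e, if_neg hnb]
          have hc : cntGT ranks score = ranks.length - 1 := by
            apply cnt_bot_eq ranks score hp (h2e ▸ hbotmem)
            intro x hx
            calc score ≤ ranks.getD (ranks.length - 1) 0 := h2
              _ ≤ x := hmin x hx
          rw [hc]
          have hcast : ((ranks.length - 1 : Nat) : Int) + 1 = (ranks.length : Int) := by omega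
          rw [hcast]
          exact ih ranks (out ++ [(ranks.length : Int)]) hne hp
        · have hyb : score < ranks.getD (ranks.length - 1) 0 := by omega
          rw [if_neg h2e, if_pos hyb]
          have hsb : score < ranks.getD (ranks.length - 1) 0 := by omega
          have hc : cntGT ranks score = ranks.length :=
            cnt_below ranks score (fun x hx => lt_of_lt_of_le hsb (hmin x hx))
          rw [hc]
          have hrw : score :: ranks.reverse = (ranks ++ [score]).reverse := by simp
          rw [hrw]
          exact ih (ranks ++ [score]) (out ++ [(ranks.length : Int) + 1]) (by simp) (by
            rw [List.pairwise_append]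
            refine ⟨hp, by simp, ?_⟩
            intro x hx y hy
            simp at hy
            subst hy
            exact lt_of_lt_of_le hsb (hmin x hx))
      · have hnb : ¬ score < ranks.getD (ranks.length - 1) 0 := by omega
        rw [if_neg h2, if_neg hnb]
        have hchar := char_desc score ranks hp
        have hscan : pvAscan score ranks 0 = some (cntGT ranks score + 1) := by
          apply ascan_spec0 score ranks hchar hlen
          · intro hc; omega
          · omega
        rw [hscan]
        have := ih ranks (out ++ [((cntGT ranks score + 1 : Nat) : Int)]) hne hp
        simpa using this

-- ===== VERDICT (by name: the statement is the Claim_ definition above) =====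
lemma desc_eq_rev (ranked : List Int) :
    PySem.List.sorted (PySem.Set.ofList ranked) (fun x => x) true
      = (PySem.List.sorted (PySem.Set.ofList ranked) (fun x => x) false).reverse := by
  apply PySem.List.sorted_rev_eq_of_perm_of_pairwise_gt
  · exact (List.reverse_perm _).trans (PySem.List.sorted_perm _ _ _)
  · rw [List.pairwise_reverse]
    exact PySem.List.sorted_ofList_pairwise_lt ranked

theorem climbingLeaderboard_spec : Claim_equal_climbingLeaderboard := by
  intro ranked player _ hpre
  unfold Spec_climbingLeaderboard climbingLeaderboard climbingLeaderboard_alt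
  rcases hpre with hr | hpl
  · have hasc_pw := PySem.List.sorted_ofList_pairwise_lt ranked
    have hne : PySem.List.sorted (PySem.Set.ofList ranked) (fun x => x) true ≠ [] := by
      intro hnil
      rw [PySem.List.sorted_eq_nil_iff] at hnil
      revert hnil
      intro hc
      rcases List.exists_mem_of_ne_nil ranked hr with ⟨x, hx⟩
      have : x ∈ PySem.Set.ofList ranked := (PySem.Set.mem_ofList ranked x).mpr hx
      rw [hc] at this
      simp at this
    have hpw : (PySem.List.sorted (PySem.Set.ofList ranked) (fun x => x) true).Pairwise (· > ·) := by
      rw [desc_eq_rev, List.pairwise_reverse]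
      exact hasc_pw
    rw [main_loop player _ [] hne hpw, desc_eq_rev, List.reverse_reverse]
  · subst hpl
    rfl
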